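-- pv_equiv track=rewrite | github.com/dssd1001/ucb-cs61a | hog/hog.py | free_bacon
-- ===== SOURCE A (Python) =====
-- def free_bacon(opponent_score):
--     """Return the points scored from rolling 0 dice (Free Bacon)."""
--     # BEGIN PROBLEM 2
--     n = 0
--     while opponent_score > 0:
--         if opponent_score%10 > n:
--             n = opponent_score%10
--         opponent_score = opponent_score//10
--     n += 1
--     if isPrime(n):
--         n = nextPrime(n)
--     return n
--
-- def isPrime(score):
--     if (score%2==0 and score > 2) or score==1: return False
--     elif largest_factor_ofOdd(score)==1:
--         return True
--     return False
--
-- def nextPrime(n):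
--     while not isPrime(n+1):
--         n += 1
--     return n + 1
--
-- def largest_factor_ofOdd(n):
--     i = n - 1
--     while (n%i) != 0:
--         i -= 1
--     return i
-- ===== SOURCE B (Python) =====
-- # Free Bacon: the result depends only on the maximum decimal digit (0..9), so the
-- # prime-bump mapping is precomputed once as a 10-entry table instead of searched for.
-- BACON = (1, 3, 5, 4, 7, 6, 11, 8, 9, 10)
--
-- def free_bacon(opponent_score):
--     """Return the points scored from rolling 0 dice (Free Bacon)."""
--     digits = []
--     while opponent_score > 0:
--         digits.append(opponent_score % 10)
--         opponent_score = opponent_score // 10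
--     return BACON[max(digits, default=0)]
-- ===== Notes on version B (the rewrite author's own statement) =====
-- stated objective: simpler
-- what changed: All primality machinery (isPrime via a backward largest-factor scan and the nextPrime search loop) is replaced by a precomputed ten-entry table indexed by the maximum decimal digit, which is itself obtained by first collecting the digits into a list and then taking its max rather than folding a running maximum inside the loop.
import Mathlib
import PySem

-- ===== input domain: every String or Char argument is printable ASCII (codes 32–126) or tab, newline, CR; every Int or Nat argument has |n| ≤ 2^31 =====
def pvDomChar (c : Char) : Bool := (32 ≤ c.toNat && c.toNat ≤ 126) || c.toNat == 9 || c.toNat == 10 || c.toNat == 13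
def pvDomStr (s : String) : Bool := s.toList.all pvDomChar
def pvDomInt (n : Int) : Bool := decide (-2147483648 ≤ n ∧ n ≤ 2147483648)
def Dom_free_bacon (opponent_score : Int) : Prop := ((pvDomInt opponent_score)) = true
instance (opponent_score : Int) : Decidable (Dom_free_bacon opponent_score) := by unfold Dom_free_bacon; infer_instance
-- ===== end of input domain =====

-- B replaces A's primality machinery (backward largest-factor scan + nextPrime search)
-- by a precomputed ten-entry table indexed by the maximum decimal digit (objective: simpler).

-- ===== PORT A =====
-- termination certificates are stated as named lemmas (cited in decreasing_by) to keep
-- the ports' definition closures small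
lemma pvDigitDec (s : Int) (h : 0 < s) : (PySem.Int.floordiv s 10).toNat < s.toNat := by
  rw [PySem.Int.floordiv_eq_ediv_of_pos (by norm_num), Int.toNat_lt_toNat h]
  exact Int.ediv_lt_of_lt_mul (by norm_num) (by linarith)

lemma pvSubOneDec (i : Int) (h : ¬ i ≤ 0) : (i - 1).toNat < i.toNat :=
  (Int.toNat_lt_toNat (by omega)).mpr (by omega)

-- A's `while opponent_score > 0` digit-scan loop (state: remaining score, best digit n)
def fbLoopA (s n : Int) : Int :=
  if 0 < s then
    fbLoopA (PySem.Int.floordiv s 10)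
      (if PySem.Int.mod s 10 > n then PySem.Int.mod s 10 else n)
  else n
termination_by s.toNat
decreasing_by exact pvDigitDec s (by assumption)

-- `largest_factor_ofOdd`'s `while (n%i) != 0: i -= 1` loop; the `i ≤ 0` guard only makes the
-- recursion total (free_bacon reaches this code only with n ≥ 2, where Python stops at i ≥ 1,
-- and for n = 0 Python's `0 % -1 == 0` likewise returns i = -1 at once, matching the guard)
def lfoLoopA (n i : Int) : Int :=
  if i ≤ 0 then i
  else if PySem.Int.mod n i ≠ 0 then lfoLoopA n (i - 1)
  else i
termination_by i.toNat
decreasing_by exact pvSubOneDec _ (by assumption)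

def largest_factor_ofOdd (n : Int) : Int := lfoLoopA n (n - 1)

def isPrimeA (score : Int) : Bool :=
  if (PySem.Int.mod score 2 = 0 ∧ score > 2) ∨ score = 1 then false
  else if largest_factor_ofOdd score = 1 then true
  else false

-- termination support for nextPrimeA (A's unbounded `while not isPrime(n+1)` loop):
-- isPrimeA is true on every odd prime, so a witness above any n exists
lemma lfoLoopA_prime (p : Nat) (hp : p.Prime) :
    ∀ i : Nat, 1 ≤ i → i < p → lfoLoopA (p : Int) (i : Int) = 1 := by
  intro i
  induction i with
  | zero => omega
  | succ j ih =>
    intro _ hlt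
    rw [lfoLoopA]
    rcases Nat.eq_zero_or_pos j with hj | hj
    · subst hj
      have h1 : PySem.Int.mod (p : Int) ((1 : Nat) : Int) = 0 := by
        rw [PySem.Int.mod_eq_zero_iff_dvd]; simp
      norm_num [h1]
    · have hnd : ¬ ((j + 1 : Nat) : Int) ∣ (p : Int) := by
        intro hdvd
        have : (j + 1) ∣ p := by exact_mod_cast hdvd
        rcases (Nat.Prime.eq_one_or_self_of_dvd hp _ this) with h | h <;> omega
      have hm : PySem.Int.mod (p : Int) ((j + 1 : Nat) : Int) ≠ 0 := by
        rw [Ne, PySem.Int.mod_eq_zero_iff_dvd]; exact hnd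
      have hle : ¬ ((j + 1 : Nat) : Int) ≤ 0 := by push_cast; omega
      have hcast : ((j + 1 : Nat) : Int) - 1 = (j : Int) := by push_cast; ring
      rw [if_neg hle, if_pos hm, hcast]
      exact ih (by omega) (by omega)

lemma isPrimeA_of_odd_prime (p : Nat) (hp : p.Prime) (h3 : 3 ≤ p) :
    isPrimeA (p : Int) = true := by
  have hodd : ¬ (2 : Int) ∣ (p : Int) := by
    intro hdvd
    have h2 : (2 : Nat) ∣ p := by exact_mod_cast hdvd
    have := (Nat.Prime.eq_one_or_self_of_dvd hp 2 h2)
    omega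
  have hm2 : PySem.Int.mod (p : Int) 2 ≠ 0 := by
    rw [Ne, PySem.Int.mod_eq_zero_iff_dvd]; exact hodd
  have hne1 : (p : Int) ≠ 1 := by exact_mod_cast (by omega : p ≠ 1)
  have hcast : (p : Int) - 1 = ((p - 1 : Nat) : Int) := by
    have : 1 ≤ p := by omega
    push_cast [this]; ring
  have hlfo : largest_factor_ofOdd (p : Int) = 1 := by
    rw [largest_factor_ofOdd, hcast]
    exact lfoLoopA_prime p hp (p - 1) (by omega) (by omega)
  rw [isPrimeA, if_neg (by rintro (⟨h, _⟩ | h); exacts [hm2 h, hne1 h]), if_pos hlfo]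

lemma isPrimeA_exists (n : Int) : ∃ m : Nat, n < (m : Int) ∧ isPrimeA (m : Int) = true := by
  obtain ⟨p, hle, hp⟩ := Nat.exists_infinite_primes (max (n.toNat + 1) 3)
  have h3 : 3 ≤ p := le_trans (le_max_right _ _) hle
  have h1 : n.toNat + 1 ≤ p := le_trans (le_max_left _ _) hle
  refine ⟨p, ?_, isPrimeA_of_odd_prime p hp h3⟩
  have h2 : n ≤ (n.toNat : Int) := Int.self_le_toNat n
  have h4 : ((n.toNat : Nat) : Int) + 1 ≤ (p : Int) := by
    have h5 := Nat.cast_le (α := Int) |>.mpr h1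
    push_cast at h5
    omega
  omega

lemma pvNextADec (n : Int) (h : ¬ isPrimeA (n + 1) = true) :
    ((Nat.find (isPrimeA_exists (n + 1)) : Int) - (n + 1)).toNat <
      ((Nat.find (isPrimeA_exists n) : Int) - n).toNat := by
  have hspec := Nat.find_spec (isPrimeA_exists n)
  set k := Nat.find (isPrimeA_exists n) with hk
  have hne : ((k : Nat) : Int) ≠ n + 1 := by
    intro heq; rw [heq] at hspec; exact h hspec.2
  have hle : n + 1 ≤ ((k : Nat) : Int) := Int.add_one_le_iff.mpr hspec.1
  have hgt : n + 1 < ((k : Nat) : Int) := lt_of_le_of_ne hle (Ne.symm hne)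
  have hfind : Nat.find (isPrimeA_exists (n + 1)) ≤ k :=
    Nat.find_le ⟨hgt, hspec.2⟩
  have hc : ((Nat.find (isPrimeA_exists (n + 1)) : Nat) : Int) ≤ ((k : Nat) : Int) :=
    Nat.cast_le.mpr hfind
  exact (Int.toNat_lt_toNat (by omega)).mpr (by omega)

-- A's nextPrime: `while not isPrime(n+1): n += 1; return n + 1`
def nextPrimeA (n : Int) : Int :=
  if isPrimeA (n + 1) then n + 1 else nextPrimeA (n + 1)
termination_by ((Nat.find (isPrimeA_exists n) : Int) - n).toNat
decreasing_by exact pvNextADec n (by assumption)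

def free_bacon (opponent_score : Int) : Int :=
  let n := fbLoopA opponent_score 0 + 1
  if isPrimeA n then nextPrimeA n else n

-- ===== PORT B =====
-- the module-level BACON table of Source B
def baconTable : List Int := [1, 3, 5, 4, 7, 6, 11, 8, 9, 10]

-- Source B's `while opponent_score > 0: digits.append(...)` digit-collecting loop
def digitsB (s : Int) : List Int :=
  if 0 < s then PySem.Int.mod s 10 :: digitsB (PySem.Int.floordiv s 10)
  else []
termination_by s.toNat
decreasing_by exact pvDigitDec s (by assumption)

-- `max(digits, default=0)`: a left fold of binary max seeded with the default
def maxDefault0 (xs : List Int) : Int := xs.foldl max 0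

-- `BACON[...]`; the index is the max digit, always in range 0..9, so the
-- `.getD 0` default branch of the IndexError-aware primitive is never taken
def free_bacon_alt (opponent_score : Int) : Int :=
  (PySem.List.pyGet? baconTable (maxDefault0 (digitsB opponent_score))).getD 0

-- ===== PRECONDITION & SPEC =====
def Spec_free_bacon (opponent_score : Int) (out : Int) : Prop := out = free_bacon_alt opponent_score
instance (opponent_score : Int) (out : Int) : Decidable (Spec_free_bacon opponent_score out) := by unfold Spec_free_bacon; infer_instance

-- ===== CLAIM (what is proved, stated in full; the proofs are below) =====
def Claim_equal_free_bacon : Prop := ∀ (opponent_score : Int), Dom_free_bacon opponent_score → Spec_free_bacon opponent_score (free_bacon opponent_score)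

-- ===== LEMMAS AND PROOFS =====
-- A's running-maximum loop is the fold of max over B's digit list
lemma fbLoopA_eq_foldl (s : Int) : ∀ n : Int, fbLoopA s n = (digitsB s).foldl max n := by
  induction s using digitsB.induct with
  | case1 s h ih =>
    intro n
    rw [fbLoopA, if_pos h, digitsB, if_pos h, List.foldl_cons]
    have hmax : (if PySem.Int.mod s 10 > n then PySem.Int.mod s 10 else n) =
        max n (PySem.Int.mod s 10) := by
      generalize PySem.Int.mod s 10 = x; omega
    rw [hmax]; exact ih _
  | case2 s h =>
    intro n
    rw [fbLoopA, if_neg h, digitsB, if_neg h, List.foldl_nil]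

-- the digit loop stays in [0, 9]
lemma fbLoopA_bounds (s n : Int) (h0 : 0 ≤ n) (h9 : n ≤ 9) :
    0 ≤ fbLoopA s n ∧ fbLoopA s n ≤ 9 := by
  induction s, n using fbLoopA.induct with
  | case1 s n h ih =>
    rw [fbLoopA, if_pos h]
    have hm0 := PySem.Int.mod_nonneg (a := s) (b := 10) (by omega)
    have hm1 := PySem.Int.mod_lt (a := s) (b := 10) (by omega)
    exact ih (by split <;> omega) (by split <;> omega)
  | case2 s n h => rw [fbLoopA, if_neg h]; omega

-- the literal values of A's recursive helpers on the reachable arguments n ∈ [1, 10] are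
-- obtained through fueled structural copies (proof-side only) that the kernel can evaluate
def lfoFuel (n : Int) : Nat → Int → Int
  | 0, i => i
  | f + 1, i =>
    if i ≤ 0 then i
    else if PySem.Int.mod n i ≠ 0 then lfoFuel n f (i - 1)
    else i

lemma lfoLoopA_eq_fuel (n : Int) (f : Nat) :
    ∀ i : Int, i.toNat < f → lfoLoopA n i = lfoFuel n f i := by
  induction f with
  | zero => intro i h; omega
  | succ f ih =>
    intro i h
    rw [lfoLoopA]
    by_cases h0 : i ≤ 0
    · simp [lfoFuel, h0]
    · by_cases hm : PySem.Int.mod n i ≠ 0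
      · simp only [lfoFuel, if_neg h0, if_pos hm]
        exact ih (i - 1) (by omega)
      · simp [lfoFuel, h0, hm]

lemma isPrimeA_eval (k : Int) (h : (k - 1).toNat < 12) :
    isPrimeA k =
      (if (PySem.Int.mod k 2 = 0 ∧ k > 2) ∨ k = 1 then false
       else if lfoFuel k 12 (k - 1) = 1 then true else false) := by
  rw [isPrimeA, largest_factor_ofOdd, lfoLoopA_eq_fuel k 12 _ h]

lemma a1 : isPrimeA 1 = false := by rw [isPrimeA_eval 1 (by decide)]; decide
lemma a2 : isPrimeA 2 = true := by rw [isPrimeA_eval 2 (by decide)]; decide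
lemma a3 : isPrimeA 3 = true := by rw [isPrimeA_eval 3 (by decide)]; decide
lemma a4 : isPrimeA 4 = false := by rw [isPrimeA_eval 4 (by decide)]; decide
lemma a5 : isPrimeA 5 = true := by rw [isPrimeA_eval 5 (by decide)]; decide
lemma a6 : isPrimeA 6 = false := by rw [isPrimeA_eval 6 (by decide)]; decide
lemma a7 : isPrimeA 7 = true := by rw [isPrimeA_eval 7 (by decide)]; decide
lemma a8 : isPrimeA 8 = false := by rw [isPrimeA_eval 8 (by decide)]; decide
lemma a9 : isPrimeA 9 = false := by rw [isPrimeA_eval 9 (by decide)]; decide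
lemma a10 : isPrimeA 10 = false := by rw [isPrimeA_eval 10 (by decide)]; decide
lemma a11 : isPrimeA 11 = true := by rw [isPrimeA_eval 11 (by decide)]; decide

lemma nA2 : nextPrimeA 2 = 3 := by rw [nextPrimeA]; norm_num [a3]
lemma nA3 : nextPrimeA 3 = 5 := by
  rw [nextPrimeA]; norm_num [a4]; rw [nextPrimeA]; norm_num [a5]
lemma nA5 : nextPrimeA 5 = 7 := by
  rw [nextPrimeA]; norm_num [a6]; rw [nextPrimeA]; norm_num [a7]
lemma nA7 : nextPrimeA 7 = 11 := by
  rw [nextPrimeA]; norm_num [a8]; rw [nextPrimeA]; norm_num [a9]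
  rw [nextPrimeA]; norm_num [a10]; rw [nextPrimeA]; norm_num [a11]

-- on the only reachable max digits m ∈ [0, 9], A's prime-bump tail equals the table entry
lemma tail_eq_table (m : Int) (h0 : 0 ≤ m) (h9 : m ≤ 9) :
    (if isPrimeA (m + 1) then nextPrimeA (m + 1) else m + 1) =
      (PySem.List.pyGet? baconTable m).getD 0 := by
  interval_cases m <;>
    norm_num [a1, a2, a3, a4, a5, a6, a7, a8, a9, a10,
      nA2, nA3, nA5, nA7, baconTable, PySem.List.pyGet?, PySem.List.pyIdx?] <;> decide

-- ===== VERDICT (by name: the statement is the Claim_ definition above) =====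
theorem free_bacon_spec : Claim_equal_free_bacon := by
  intro s _
  unfold Spec_free_bacon free_bacon free_bacon_alt maxDefault0
  rw [← fbLoopA_eq_foldl]
  have hb := fbLoopA_bounds s 0 (by omega) (by omega)
  exact tail_eq_table (fbLoopA s 0) hb.1 hb.2
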